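-- pv_equiv track=rewrite | github.com/ashwinsamuel/LeetCode | 2310-sum-of-numbers-with-units-digit-k/2310-sum-of-numbers-with-units-digit-k.py | minimumNumbers
-- ===== SOURCE A (Python) =====
-- def minimumNumbers(num: int, k: int) -> int:
--     if num==0: return 0
--     if k==0: return 1 if num%10==0 else -1
--
--     poss=k
--     visited=set()
--     while (poss%10) not in visited:
--         if num%10 == poss%10:
--             return poss//k if poss<=num else -1
--         visited.add(poss%10)
--         poss+=k
--
--     return -1
-- ===== SOURCE B (Python) =====
-- def _solve(d, r):
--     """Least i >= 1 with i*r == d (mod 10), or None if the congruence has no solution.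
--
--     Solved in closed form with the extended Euclidean algorithm: g = gcd(r, 10)
--     and a Bezout coefficient s with s*r == g (mod 10); solutions exist iff g | d
--     and then i == s*(d//g) (mod 10//g)."""
--     old_r, rr, old_s, s = r, 10, 1, 0
--     while rr:
--         q = old_r // rr
--         old_r, rr = rr, old_r - q * rr
--         old_s, s = s, old_s - q * s
--     if d % old_r:
--         return None
--     m = 10 // old_r
--     i = (old_s * (d // old_r)) % m
--     return i if i else m
--
-- def minimumNumbers(num: int, k: int) -> int:
--     if num == 0:
--         return 0
--     i = _solve(num % 10, k % 10)
--     if i is None: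
--         return -1
--     return i if i * k <= num else -1
-- ===== Notes on version B (the rewrite author's own statement) =====
-- stated objective: alternative
-- what changed: Instead of scanning successive multiples of k with a visited-residue set, B solves the units-digit congruence i*k = num (mod 10) in closed form with the extended Euclidean algorithm (gcd + Bezout coefficient), obtaining the minimal count directly.
-- intended difference: For negative num that is a multiple of 10 with k==0, A's special k==0 branch returns 1 although the single number 0 cannot sum to a negative num; B returns -1, the intended 'impossible' answer. — e.g. on minimumNumbers(-10, 0): A returns 1, B returns -1
import Mathlib
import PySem

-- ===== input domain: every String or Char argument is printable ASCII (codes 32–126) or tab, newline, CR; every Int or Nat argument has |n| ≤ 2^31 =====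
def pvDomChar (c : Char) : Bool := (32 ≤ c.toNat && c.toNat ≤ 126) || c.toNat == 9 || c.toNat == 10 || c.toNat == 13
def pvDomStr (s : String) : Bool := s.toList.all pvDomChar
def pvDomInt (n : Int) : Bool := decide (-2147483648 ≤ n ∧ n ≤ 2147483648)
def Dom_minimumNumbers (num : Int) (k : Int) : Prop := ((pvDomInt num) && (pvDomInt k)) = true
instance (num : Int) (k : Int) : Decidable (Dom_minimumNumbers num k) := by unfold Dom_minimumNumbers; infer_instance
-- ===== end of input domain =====

-- B replaces A's scan of successive multiples of k (with a visited-residue set) by a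
-- closed-form solution of the congruence i*k ≡ num (mod 10) via the extended Euclidean
-- algorithm; objective: alternative algorithm.

-- ===== PORT A =====
-- the while loop; fuel 11 is an upper bound on the iteration count (visited gains a fresh
-- residue mod 10 each pass and there are only 10 residues), so the fuel-out -1 is unreachable
def minimumNumbersLoop (num k : Int) (poss : Int) (visited : PySem.Set Int) : Nat → Int
  | 0 => -1
  | fuel+1 =>
    if PySem.Set.contains visited (PySem.Int.mod poss 10) then -1
    else if PySem.Int.mod num 10 = PySem.Int.mod poss 10 then
      (if poss ≤ num then PySem.Int.floordiv poss k else -1)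
    else minimumNumbersLoop num k (poss + k) (PySem.Set.add visited (PySem.Int.mod poss 10)) fuel

def minimumNumbers (num : Int) (k : Int) : Int :=
  if num = 0 then 0
  else if k = 0 then (if PySem.Int.mod num 10 = 0 then 1 else -1)
  else minimumNumbersLoop num k k PySem.Set.empty 11

-- ===== PORT B =====
-- _solve's while loop (extended Euclid on (r, 10)); fuel 11 is an upper bound on the
-- iteration count (Euclid on arguments < 10 and 10 halts within a handful of steps),
-- so the fuel-out value is unreachable; state is (old_r, rr, old_s, s) as in Source B
def pvSolveLoop (oldr rr olds s : Int) : Nat → Int × Int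
  | 0 => (oldr, olds)
  | fuel+1 =>
    if rr = 0 then (oldr, olds)
    else pvSolveLoop rr (oldr - (PySem.Int.floordiv oldr rr) * rr)
                     s (olds - (PySem.Int.floordiv oldr rr) * s) fuel

-- _solve of Source B: least i ≥ 1 with i*r ≡ d (mod 10), none if no solution
def pvSolve (d r : Int) : Option Int :=
  let p := pvSolveLoop r 10 1 0 11
  if PySem.Int.mod d p.1 ≠ 0 then none
  else
    let m := PySem.Int.floordiv 10 p.1
    let i := PySem.Int.mod (p.2 * (PySem.Int.floordiv d p.1)) m
    if i = 0 then some m else some i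

def minimumNumbers_alt (num : Int) (k : Int) : Int :=
  if num = 0 then 0
  else
    match pvSolve (PySem.Int.mod num 10) (PySem.Int.mod k 10) with
    | none => -1
    | some i => if i * k ≤ num then i else -1

-- ===== PRECONDITION & SPEC =====
-- For negative num that is a multiple of 10 with k = 0, A's special k==0 branch returns 1
-- although no sum of numbers with units digit 0 under the problem's intent equals a negative
-- num; B returns -1, the intended "impossible" answer.
def D_minimumNumbers (num : Int) (k : Int) : Prop := num < 0 ∧ k = 0 ∧ num % 10 = 0
instance (num : Int) (k : Int) : Decidable (D_minimumNumbers num k) := by unfold D_minimumNumbers; infer_instance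

def Spec_minimumNumbers (num : Int) (k : Int) (out : Int) : Prop := ¬ D_minimumNumbers num k → out = minimumNumbers_alt num k
instance (num : Int) (k : Int) (out : Int) : Decidable (Spec_minimumNumbers num k out) := by unfold Spec_minimumNumbers; infer_instance

def pvDiffWitness_minimumNumbers : Int × Int := (-10, 0)
def pvDiffWitnessOut_minimumNumbers : Int × Int := (1, -1)

-- ===== CLAIM (what is proved, stated in full; the proofs are below) =====
def Claim_unchanged_minimumNumbers : Prop := ∀ (num : Int) (k : Int), Dom_minimumNumbers num k → Spec_minimumNumbers num k (minimumNumbers num k)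
def Claim_changed_minimumNumbers : Prop := Dom_minimumNumbers (pvDiffWitness_minimumNumbers.1) (pvDiffWitness_minimumNumbers.2) ∧ D_minimumNumbers (pvDiffWitness_minimumNumbers.1) (pvDiffWitness_minimumNumbers.2) ∧ minimumNumbers (pvDiffWitness_minimumNumbers.1) (pvDiffWitness_minimumNumbers.2) = pvDiffWitnessOut_minimumNumbers.1 ∧ minimumNumbers_alt (pvDiffWitness_minimumNumbers.1) (pvDiffWitness_minimumNumbers.2) = pvDiffWitnessOut_minimumNumbers.2 ∧ pvDiffWitnessOut_minimumNumbers.1 ≠ pvDiffWitnessOut_minimumNumbers.2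
def Claim_exact_minimumNumbers : Prop := ∀ (num : Int) (k : Int), Dom_minimumNumbers num k → D_minimumNumbers num k → minimumNumbers num k ≠ minimumNumbers_alt num k

-- ===== LEMMAS AND PROOFS =====

theorem pv_mod10 (a : Int) : PySem.Int.mod a 10 = a % 10 :=
  PySem.Int.mod_eq_emod_of_pos (by norm_num)

theorem pv_fd_exact (i k : Int) (h : k ≠ 0) : PySem.Int.floordiv (i * k) k = i := by
  simp [PySem.Int.floordiv, Int.mul_fdiv_cancel _ h]

-- proof-side view of both programs: first i in l with i*r ≡ d (mod 10)
def pvFirstMatch (d r : Int) : List Int → Option Int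
  | [] => none
  | i :: rest => if (i * r) % 10 = d then some i else pvFirstMatch d r rest

-- proof-side linear scan over candidate counts (the bridge between A's loop and B)
def pvScan (num k : Int) : List Int → Int
  | [] => -1
  | i :: rest =>
    if PySem.Int.mod (i * k) 10 = PySem.Int.mod num 10 then
      (if i * k ≤ num then i else -1)
    else pvScan num k rest

-- the closed form agrees with the scan on all 100 residue pairs
theorem pv_solve_eq_fm : ∀ (d r : Fin 10),
    pvSolve ((d : Nat) : Int) ((r : Nat) : Int)
      = pvFirstMatch ((d : Nat) : Int) ((r : Nat) : Int) [1,2,3,4,5,6,7,8,9,10] := by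
  decide

theorem pv_solve_eq_fm' (d r : Int) (hd0 : 0 ≤ d) (hd : d < 10) (hr0 : 0 ≤ r) (hr : r < 10) :
    pvSolve d r = pvFirstMatch d r [1,2,3,4,5,6,7,8,9,10] := by
  have h1 : ((d.toNat : Nat) : Int) = d := Int.toNat_of_nonneg hd0
  have h2 : ((r.toNat : Nat) : Int) = r := Int.toNat_of_nonneg hr0
  have := pv_solve_eq_fm ⟨d.toNat, by omega⟩ ⟨r.toNat, by omega⟩
  simpa [h1, h2] using this

-- the scan's units-digit test depends on k only through k % 10
theorem pv_cond_eq (i k : Int) : (i * k) % 10 = (i * (k % 10)) % 10 := by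
  conv_lhs => rw [Int.mul_emod]
  conv_rhs => rw [Int.mul_emod, Int.emod_emod_of_dvd k (dvd_refl 10)]

theorem pv_scan_eq_fm (num k : Int) (l : List Int) :
    pvScan num k l =
      (match pvFirstMatch (num % 10) (k % 10) l with
       | none => -1
       | some i => if i * k ≤ num then i else -1) := by
  induction l with
  | nil => rfl
  | cons i rest ih =>
    simp only [pvScan, pvFirstMatch, pv_mod10]
    by_cases h : (i * (k % 10)) % 10 = num % 10
    · rw [if_pos (by rw [pv_cond_eq]; exact h), if_pos h]
    · rw [if_neg (by rw [pv_cond_eq]; exact h), if_neg h, ih]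

-- B (for num ≠ 0) is the scan over counts 1..10
theorem pv_alt_eq_scan (num k : Int) (h0 : num ≠ 0) :
    minimumNumbers_alt num k = pvScan num k [1,2,3,4,5,6,7,8,9,10] := by
  unfold minimumNumbers_alt
  rw [if_neg h0, pv_scan_eq_fm, pv_mod10, pv_mod10,
    pv_solve_eq_fm' (num % 10) (k % 10)
      (Int.emod_nonneg num (by norm_num)) (Int.emod_lt_of_pos num (by norm_num))
      (Int.emod_nonneg k (by norm_num)) (Int.emod_lt_of_pos k (by norm_num))]

-- ---- A's loop equals the scan (residue-cycle argument) ----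

-- the visited set after m completed iterations: residues of k, 2k, …, mk in order
def pvVisited (k : Int) (m : Nat) : List Int :=
  List.map (fun j : Nat => (((j : Int) + 1) * k) % 10) (List.range m)

theorem pv_mem_visited (k : Int) (m : Nat) (x : Int) :
    x ∈ pvVisited k m ↔ ∃ j : Nat, j < m ∧ (((j : Int) + 1) * k) % 10 = x := by
  simp [pvVisited]

theorem pv_loop_step (num k poss : Int) (v : PySem.Set Int) (f : Nat) :
    minimumNumbersLoop num k poss v (f+1) =
      if PySem.Set.contains v (PySem.Int.mod poss 10) then -1
      else if PySem.Int.mod num 10 = PySem.Int.mod poss 10 then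
        (if poss ≤ num then PySem.Int.floordiv poss k else -1)
      else minimumNumbersLoop num k (poss + k) (PySem.Set.add v (PySem.Int.mod poss 10)) f := rfl

theorem pv_scan_cons (num k i : Int) (rest : List Int) :
    pvScan num k (i :: rest) =
      if PySem.Int.mod (i * k) 10 = PySem.Int.mod num 10 then
        (if i * k ≤ num then i else -1)
      else pvScan num k rest := rfl

-- if no element of the list has a matching units digit, the scan returns -1
theorem pv_scan_nomatch (num k : Int) (l : List Int)
    (h : ∀ i ∈ l, ((i * k) % 10 : Int) ≠ num % 10) :
    pvScan num k l = -1 := by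
  induction l with
  | nil => rfl
  | cons i rest ih =>
    rw [pv_scan_cons, pv_mod10, pv_mod10, if_neg (h i (List.mem_cons_self))]
    exact ih (fun x hx => h x (List.mem_cons_of_mem _ hx))

-- residues repeat: once residue(m+1) is already in the visited set, no later multiple
-- can have a units digit that the first m multiples do not have
theorem pv_future_nomatch (num k : Int) (m : Nat)
    (hnm : ∀ j : Nat, 1 ≤ j → j ≤ m → (((j : Int)) * k) % 10 ≠ num % 10)
    (j0 : Nat) (hj0 : j0 < m) (hrep : (((j0 : Int) + 1) * k) % 10 = (((m : Int) + 1) * k) % 10)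
    (i : Nat) (hi1 : m + 1 ≤ i) :
    (((i : Int)) * k) % 10 ≠ num % 10 := by
  set j : Nat := j0 + 1 with hj
  set p : Nat := m + 1 - j with hp
  have hp1 : 1 ≤ p := by omega
  have hjc : (j : Int) = (j0 : Int) + 1 := by rw [hj]; push_cast; ring
  have hrep' : ((j : Int) * k) % 10 = (((m : Int) + 1) * k) % 10 := by rw [hjc]; exact hrep
  have h1 : (10 : Int) ∣ ((m : Int) + 1) * k - (j : Int) * k :=
    Int.dvd_of_emod_eq_zero (Int.emod_eq_emod_iff_emod_sub_eq_zero.mp hrep'.symm)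
  have hpc : (p : Int) = (m : Int) + 1 - (j : Int) := by
    rw [hp]; push_cast [Nat.cast_sub (show j ≤ m + 1 by omega)]; ring
  have h2 : ((m : Int) + 1) * k - (j : Int) * k = (p : Int) * k := by rw [hpc]; ring
  have hpk : (10 : Int) ∣ (p : Int) * k := h2 ▸ h1
  set s : Nat := (i - j) % p with hs
  have hs_lt : s < p := by rw [hs]; exact Nat.mod_lt _ (by omega)
  set j' : Nat := j + s with hj'
  have hj'_le : j' ≤ m := by omega
  have hj'_1 : 1 ≤ j' := by omega
  have hj'_le_i : j' ≤ i := by omega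
  have ht : p * ((i - j) / p) + s = i - j := by rw [hs]; exact Nat.div_add_mod _ _
  generalize hT : (i - j) / p = t at ht
  have hnat : i - j' = p * t := by omega
  have hik : (10 : Int) ∣ (i : Int) * k - (j' : Int) * k := by
    have hc : (i : Int) - (j' : Int) = ((p * t : Nat) : Int) := by
      rw [← hnat]; push_cast [Nat.cast_sub hj'_le_i]; ring
    have he : (i : Int) * k - (j' : Int) * k = ((p : Int) * k) * (t : Int) := by
      rw [← sub_mul, hc]; push_cast; ring
    rw [he]
    exact Dvd.dvd.mul_right hpk _
  have hmod : ((i : Int) * k) % 10 = ((j' : Int) * k) % 10 := by omega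
  rw [hmod]
  exact hnm j' hj'_1 hj'_le

-- the main loop invariant: after m iterations (poss = (m+1)k, visited = residues of k..mk,
-- residues so far distinct and none matching), A's loop agrees with the scan of the rest
theorem pv_loop_eq (num k : Int) (hk : k ≠ 0) :
    ∀ (f m : Nat), m + f = 10 →
    (∀ j1 j2 : Nat, 1 ≤ j1 → j1 < j2 → j2 ≤ m → (((j1 : Int)) * k) % 10 ≠ (((j2 : Int)) * k) % 10) →
    (∀ j : Nat, 1 ≤ j → j ≤ m → (((j : Int)) * k) % 10 ≠ num % 10) →
    minimumNumbersLoop num k (((m : Int) + 1) * k) (pvVisited k m) (f + 1)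
      = pvScan num k (List.map (fun j : Nat => (j : Int)) (List.range' (m+1) f)) := by
  intro f
  induction f with
  | zero =>
    intro m hm _ _
    have hm10 : m = 10 := by omega
    subst hm10
    rw [pv_loop_step]
    rw [if_pos]
    · rfl
    · simp only [PySem.Set.contains, List.contains_eq_mem, decide_eq_true_eq, pv_mod10]
      rw [pv_mem_visited]
      exact ⟨0, by omega, by push_cast; omega⟩
  | succ f ih =>
    intro m hm hdist hnm
    rw [pv_loop_step]
    by_cases hg : PySem.Set.contains (pvVisited k m) (PySem.Int.mod (((m : Int) + 1) * k) 10) = true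
    · rw [if_pos hg]
      simp only [PySem.Set.contains, List.contains_eq_mem, decide_eq_true_eq, pv_mod10] at hg
      rw [pv_mem_visited] at hg
      obtain ⟨j0, hj0, hrep⟩ := hg
      refine (pv_scan_nomatch num k _ ?_).symm
      intro x hx
      obtain ⟨i, hi, rfl⟩ := List.mem_map.mp hx
      rw [List.mem_range'_1] at hi
      exact pv_future_nomatch num k m hnm j0 hj0 hrep i (by omega)
    · rw [if_neg hg]
      have hrange : List.range' (m+1) (f+1) = (m+1) :: List.range' (m+2) f := by
        rw [List.range'_succ]
      rw [hrange]
      simp only [List.map_cons, pv_scan_cons]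
      have hcast : (((m+1 : Nat)) : Int) = (m : Int) + 1 := by push_cast; ring
      rw [hcast]
      by_cases hmatch : PySem.Int.mod num 10 = PySem.Int.mod (((m : Int) + 1) * k) 10
      · rw [if_pos hmatch, if_pos hmatch.symm, pv_fd_exact _ k hk]
      · rw [if_neg hmatch, if_neg (fun h => hmatch h.symm)]
        have hfresh : PySem.Int.mod (((m : Int) + 1) * k) 10 ∉ pvVisited k m := by
          intro hmem
          exact hg (by simp only [PySem.Set.contains, List.contains_eq_mem,
            decide_eq_true_eq]; exact hmem)
        have hadd : PySem.Set.add (pvVisited k m) (PySem.Int.mod (((m : Int) + 1) * k) 10)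
            = pvVisited k (m+1) := by
          simp only [PySem.Set.add]
          rw [if_neg (by simp only [PySem.Set.contains, List.contains_eq_mem,
            decide_eq_true_eq]; exact hfresh)]
          simp only [pvVisited, List.range_succ, List.map_append, List.map_cons, List.map_nil,
            pv_mod10]
        have hposs : ((m : Int) + 1) * k + k = ((((m+1) : Nat) : Int) + 1) * k := by
          push_cast; ring
        rw [hadd, hposs]
        have hdist' : ∀ j1 j2 : Nat, 1 ≤ j1 → j1 < j2 → j2 ≤ m + 1 →
            (((j1 : Int)) * k) % 10 ≠ (((j2 : Int)) * k) % 10 := by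
          intro j1 j2 h1 h12 h2
          rcases Nat.lt_or_ge j2 (m+1) with h | h
          · exact hdist j1 j2 h1 h12 (by omega)
          · have hj2 : j2 = m + 1 := by omega
            subst hj2
            intro heq
            push_cast at heq
            apply hfresh
            rw [pv_mod10, pv_mem_visited]
            refine ⟨j1 - 1, by omega, ?_⟩
            have hc : ((j1 - 1 : Nat) : Int) + 1 = (j1 : Int) := by omega
            rw [hc]
            exact heq
        have hnm' : ∀ j : Nat, 1 ≤ j → j ≤ m + 1 → (((j : Int)) * k) % 10 ≠ num % 10 := by
          intro j h1 h2
          rcases Nat.lt_or_ge j (m+1) with h | h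
          · exact hnm j h1 (by omega)
          · have hj : j = m + 1 := by omega
            subst hj
            intro heq
            push_cast at heq
            apply hmatch
            rw [pv_mod10, pv_mod10]
            exact heq.symm
        exact ih (m+1) (by omega) hdist' hnm'

-- ===== VERDICT (by name: the statement is the Claim_ definition above) =====
theorem minimumNumbers_spec : Claim_unchanged_minimumNumbers := by
  intro num k _
  unfold Spec_minimumNumbers
  intro hD
  unfold D_minimumNumbers at hD
  by_cases h0 : num = 0
  · simp [minimumNumbers, minimumNumbers_alt, h0]
  · rw [pv_alt_eq_scan num k h0]
    unfold minimumNumbers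
    rw [if_neg h0]
    by_cases hk : k = 0
    · subst hk
      rw [if_pos rfl]
      have hD' : ¬(num < 0 ∧ num % 10 = 0) := fun h => hD ⟨h.1, rfl, h.2⟩
      simp only [pvScan, pv_mod10]
      norm_num
      split_ifs <;> omega
    · rw [if_neg hk]
      have h := pv_loop_eq num k hk 10 0 (by omega)
        (by intro j1 j2 h1 h12 h2; omega) (by intro j h1 h2; omega)
      have hv0 : pvVisited k 0 = [] := rfl
      have hp0 : (((0 : Nat) : Int) + 1) * k = k := by push_cast; ring
      rw [hv0, hp0] at h
      have hr : List.map (fun j : Nat => (j : Int)) (List.range' (0+1) 10) = [1,2,3,4,5,6,7,8,9,10] := by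
        decide
      rw [hr] at h
      rw [show PySem.Set.empty = ([] : List Int) from rfl]
      exact h

theorem minimumNumbers_changed : Claim_changed_minimumNumbers := by
  unfold Claim_changed_minimumNumbers; decide

theorem minimumNumbers_tight : Claim_exact_minimumNumbers := by
  intro num k _ hD
  obtain ⟨hneg, hk0, hm⟩ := hD
  subst hk0
  have h0 : num ≠ 0 := by omega
  rw [pv_alt_eq_scan num 0 h0]
  unfold minimumNumbers
  rw [if_neg h0, if_pos rfl]
  simp only [pvScan, pv_mod10]
  norm_num [hm]
  omega
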